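-- pv_equiv track=rewrite | github.com/SL-SARAN/AgenticAI-EducationalCoach | learner_model.py | normalize_mistake_key
-- ===== SOURCE A (Python) =====
-- VALID_MISTAKE_CATEGORIES = [
--     "Concept Confusion",
--     "Logic Error",
--     "Order Confusion",
--     "Syntax/Base Missing",
--     "General Error",
-- ]
--
-- def normalize_mistake_key(raw):
--     """
--     Strip LLM noise from mistake classifications.
--     E.g., '- Concept Confusion\n\nLong explanation...' → 'Concept Confusion'
--     Also catches: "The answer is 'Concept Confusion'. ..." → 'Concept Confusion'
--     """
--     if not raw or not isinstance(raw, str):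
--         return "General Error"
--
--     # Strip leading dashes, whitespace, and markdown formatting
--     cleaned = raw.strip().lstrip("-").strip()
--
--     # Pass 1: match a known category at the START of the string
--     for category in VALID_MISTAKE_CATEGORIES:
--         if cleaned.lower().startswith(category.lower()):
--             return category
--
--     # Pass 2: search for a known category ANYWHERE in the string
--     for category in VALID_MISTAKE_CATEGORIES:
--         if category.lower() in cleaned.lower():
--             return category
--
--     # If nothing matched, take only the first line and clean it
--     first_line = cleaned.split("\n")[0].strip().rstrip(".")
--     # Remove any trailing explanation after a common separator
--     for sep in [" —", " -", ":", ";"]: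
--         if sep in first_line:
--             first_line = first_line.split(sep)[0].strip()
--
--     return first_line if first_line else "General Error"
-- ===== SOURCE B (Python) =====
-- VALID_MISTAKE_CATEGORIES = [
--     "Concept Confusion",
--     "Logic Error",
--     "Order Confusion",
--     "Syntax/Base Missing",
--     "General Error",
-- ]
--
-- def normalize_mistake_key(raw):
--     if not raw or not isinstance(raw, str):
--         return "General Error"
--     cleaned = raw.strip().lstrip("-").strip()
--     low = cleaned.lower()
--
--     # Score every category at once: 0 = prefix match, 1 = substring match, 2 = no match.
--     # A stable min over (rank, list position) is exactly A's priority rule.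
--     def rank(category):
--         cl = category.lower()
--         if low.startswith(cl):
--             return 0
--         if cl in low:
--             return 1
--         return 2
--
--     best = min(VALID_MISTAKE_CATEGORIES, key=rank)
--     if rank(best) < 2:
--         return best
--
--     first_line = cleaned.split("\n")[0].strip().rstrip(".")
--     for sep in [" \u2014", " -", ":", ";"]:
--         if sep in first_line:
--             first_line = first_line.split(sep)[0].strip()
--     return first_line if first_line else "General Error"
-- ===== Notes on version B (the rewrite author's own statement) =====
-- stated objective: alternative
-- what changed: B replaces A's two staged early-return scans (prefix pass, then substring pass) by a score-and-select scheme: every category gets a rank (0 prefix match, 1 substring match, 2 none) and a single stable min over the category list picks the winner, falling back only when the minimum rank is 2.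
import Mathlib
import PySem

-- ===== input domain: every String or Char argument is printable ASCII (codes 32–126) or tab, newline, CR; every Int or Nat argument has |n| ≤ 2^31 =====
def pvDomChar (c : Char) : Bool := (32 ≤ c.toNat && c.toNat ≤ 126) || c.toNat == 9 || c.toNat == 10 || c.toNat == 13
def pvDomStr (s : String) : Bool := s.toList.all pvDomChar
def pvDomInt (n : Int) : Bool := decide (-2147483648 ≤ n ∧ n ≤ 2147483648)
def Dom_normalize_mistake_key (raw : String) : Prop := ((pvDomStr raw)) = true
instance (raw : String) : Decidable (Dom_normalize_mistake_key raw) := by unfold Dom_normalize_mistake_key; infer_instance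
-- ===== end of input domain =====

-- B replaces A's two staged early-return scans (prefix pass, then substring pass) by a
-- score-and-select scheme: rank each category 0/1/2 once and take a stable min; same cost.

-- shared module constant, like Python's VALID_MISTAKE_CATEGORIES
def pvCategories : List String :=
  ["Concept Confusion", "Logic Error", "Order Confusion", "Syntax/Base Missing", "General Error"]

-- s.rstrip(".") ported by hand: drop trailing '.' characters (exact for this fixed strip set)
def pvRstripDot (cs : List Char) : List Char := (cs.reverse.dropWhile (fun c => c == '.')).reverse

-- the separator-trimming loop of the fallback (identical lines in A and in Source B)
def pvSepLoop : List (List Char) → List Char → List Char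
  | [], fl => fl
  | sep :: rest, fl =>
      pvSepLoop rest
        (if PySem.Chars.isIn sep fl
         then PySem.Chars.strip ((PySem.Chars.splitOn fl sep).headD [])
         else fl)

-- ===== PORT A =====
-- Pass 1 of A: first category whose lowercase is a PREFIX of cleaned.lower() (recomputed per iteration, as in A)
def pvPass1 : List String → List Char → Option String
  | [], _ => none
  | cat :: rest, cleaned =>
      if PySem.Chars.startswith (PySem.Chars.lower cleaned) (PySem.Chars.lower cat.toList)
      then some cat else pvPass1 rest cleaned

-- Pass 2 of A: first category whose lowercase occurs ANYWHERE in cleaned.lower()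
def pvPass2 : List String → List Char → Option String
  | [], _ => none
  | cat :: rest, cleaned =>
      if PySem.Chars.isIn (PySem.Chars.lower cat.toList) (PySem.Chars.lower cleaned)
      then some cat else pvPass2 rest cleaned

def normalize_mistake_key (raw : String) : String :=
  if raw == "" then "General Error"
  else
    let cleaned := PySem.Chars.strip ((PySem.Chars.strip raw.toList).dropWhile (fun c => c == '-'))
    match pvPass1 pvCategories cleaned with
    | some cat => cat
    | none =>
      match pvPass2 pvCategories cleaned with
      | some cat => cat
      | none =>
        let first_line := pvRstripDot (PySem.Chars.strip ((PySem.Chars.splitOn cleaned ['\n']).headD []))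
        let first_line := pvSepLoop [[' ', '—'], [' ', '-'], [':'], [';']] first_line
        if first_line.isEmpty then "General Error" else String.ofList first_line

-- ===== PORT B =====
-- Source B's rank: 0 = prefix match, 1 = substring match, 2 = no match
def pvRank (low : List Char) (category : String) : Nat :=
  let cl := PySem.Chars.lower category.toList
  if PySem.Chars.startswith low cl then 0
  else if PySem.Chars.isIn cl low then 1
  else 2

-- Source B's fallback block (the same cleanup lines as A's)
def pvFallback (cleaned : List Char) : String :=
  let first_line := pvRstripDot (PySem.Chars.strip ((PySem.Chars.splitOn cleaned ['\n']).headD []))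
  let first_line := pvSepLoop [[' ', '—'], [' ', '-'], [':'], [';']] first_line
  if first_line.isEmpty then "General Error" else String.ofList first_line

def normalize_mistake_key_alt (raw : String) : String :=
  if raw == "" then "General Error"
  else
    let cleaned := PySem.Chars.strip ((PySem.Chars.strip raw.toList).dropWhile (fun c => c == '-'))
    let low := PySem.Chars.lower cleaned
    match PySem.List.min? pvCategories (pvRank low) with          -- min(VALID_MISTAKE_CATEGORIES, key=rank): stable, first minimum
    | some best => if pvRank low best < 2 then best else pvFallback cleaned
    | none => "General Error"  -- unreachable: pvCategories is a nonempty literal, Python's min never raises here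

-- ===== PRECONDITION & SPEC =====
def Spec_normalize_mistake_key (raw : String) (out : String) : Prop := out = normalize_mistake_key_alt raw
instance (raw : String) (out : String) : Decidable (Spec_normalize_mistake_key raw out) := by unfold Spec_normalize_mistake_key; infer_instance

-- ===== CLAIM =====
def Claim_equal_normalize_mistake_key : Prop := ∀ (raw : String), Dom_normalize_mistake_key raw → Spec_normalize_mistake_key raw (normalize_mistake_key raw)

-- ===== LEMMAS AND PROOFS =====

theorem pvRank_le_two (low : List Char) (c : String) : pvRank low c ≤ 2 := by
  simp only [pvRank]; split_ifs <;> omega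

theorem pvRank_eq_zero_iff (low : List Char) (c : String) :
    pvRank low c = 0 ↔ PySem.Chars.startswith low (PySem.Chars.lower c.toList) = true := by
  simp only [pvRank]; split_ifs with h1 h2 <;> simp [h1]

-- A's pass 1 is the first rank-0 category
theorem pvPass1_eq_find (cats : List String) (cleaned : List Char) :
    pvPass1 cats cleaned = cats.find? (fun c => pvRank (PySem.Chars.lower cleaned) c == 0) := by
  induction cats with
  | nil => rfl
  | cons c rest ih =>
    simp only [pvPass1]
    by_cases h : PySem.Chars.startswith (PySem.Chars.lower cleaned) (PySem.Chars.lower c.toList) = true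
    · have e : (pvRank (PySem.Chars.lower cleaned) c == 0) = true := by
        simpa using (pvRank_eq_zero_iff _ _).mpr h
      rw [List.find?_cons_of_pos (p := fun c => pvRank (PySem.Chars.lower cleaned) c == 0) e]
      simp [h]
    · have e : ¬ (pvRank (PySem.Chars.lower cleaned) c == 0) = true := by
        simpa using fun hz => h ((pvRank_eq_zero_iff _ _).mp hz)
      rw [List.find?_cons_of_neg (p := fun c => pvRank (PySem.Chars.lower cleaned) c == 0) e]
      simp only [h]
      exact ih

-- when no category has rank 0, A's pass 2 is the first rank-1 category
theorem pvPass2_eq_find (cats : List String) (cleaned : List Char)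
    (hnone : cats.find? (fun c => pvRank (PySem.Chars.lower cleaned) c == 0) = none) :
    pvPass2 cats cleaned = cats.find? (fun c => pvRank (PySem.Chars.lower cleaned) c == 1) := by
  induction cats with
  | nil => rfl
  | cons c rest ih =>
    have hc : pvRank (PySem.Chars.lower cleaned) c ≠ 0 := by
      intro hz
      have := List.find?_eq_none.mp hnone c (by simp)
      simp [hz] at this
    have hrest : rest.find? (fun c => pvRank (PySem.Chars.lower cleaned) c == 0) = none := by
      rw [List.find?_eq_none]
      intro x hx
      have := List.find?_eq_none.mp hnone x (by simp [hx])
      simpa using this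
    have hns : ¬ PySem.Chars.startswith (PySem.Chars.lower cleaned) (PySem.Chars.lower c.toList) = true := by
      intro h; exact hc ((pvRank_eq_zero_iff _ _).mpr h)
    simp only [pvPass2]
    by_cases hin : PySem.Chars.isIn (PySem.Chars.lower c.toList) (PySem.Chars.lower cleaned) = true
    · have e : (pvRank (PySem.Chars.lower cleaned) c == 1) = true := by
        simp [pvRank, hns, hin]
      rw [List.find?_cons_of_pos (p := fun c => pvRank (PySem.Chars.lower cleaned) c == 1) e]
      simp [hin]
    · have e : ¬ (pvRank (PySem.Chars.lower cleaned) c == 1) = true := by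
        simp [pvRank, hns, hin]
      rw [List.find?_cons_of_neg (p := fun c => pvRank (PySem.Chars.lower cleaned) c == 1) e]
      simp only [hin]
      exact ih hrest

-- the stable min-by-rank fold, started from an accumulator m, in terms of the first rank-0 / rank-1 elements
theorem pvFold_min_rank (low : List Char) (cats : List String) (m : String) :
    List.foldl
      (fun acc x =>
        match acc with
        | none => some x
        | some m => if pvRank low x < pvRank low m then some x else some m)
      (some m) cats =
    (if pvRank low m = 0 then some m
     else match cats.find? (fun c => pvRank low c == 0) with
     | some c => some c
     | none =>
       if pvRank low m = 1 then some m
       else match cats.find? (fun c => pvRank low c == 1) with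
         | some c => some c
         | none => some m) := by
  induction cats generalizing m with
  | nil => split_ifs <;> rfl
  | cons c rest ih =>
    have hm2 := pvRank_le_two low m
    have hc2 := pvRank_le_two low c
    simp only [List.foldl_cons]
    by_cases hc0 : pvRank low c = 0
    · have e0 : (pvRank low c == 0) = true := by simpa using hc0
      rw [List.find?_cons_of_pos (p := fun c => pvRank low c == 0) e0]
      by_cases hm0 : pvRank low m = 0
      · rw [if_neg (by omega : ¬ pvRank low c < pvRank low m), ih m]
        simp [hm0]
      · rw [if_pos (by omega), ih c]
        simp [hc0, hm0]
    · have e0 : ¬ (pvRank low c == 0) = true := by simpa using hc0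
      rw [List.find?_cons_of_neg (p := fun c => pvRank low c == 0) e0]
      by_cases hm0 : pvRank low m = 0
      · rw [if_neg (by omega), ih m]
        simp [hm0]
      · by_cases hm1 : pvRank low m = 1
        · rw [if_neg (by omega), ih m]
          simp [hm1]
        · -- rank m = 2
          by_cases hc1 : pvRank low c = 1
          · have e1 : (pvRank low c == 1) = true := by simpa using hc1
            rw [List.find?_cons_of_pos (p := fun c => pvRank low c == 1) e1, if_pos (by omega), ih c]
            simp [hc1, hm0, hm1]
          · have e1 : ¬ (pvRank low c == 1) = true := by simpa using hc1
            rw [List.find?_cons_of_neg (p := fun c => pvRank low c == 1) e1, if_neg (by omega), ih m]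

theorem pvFold_min_rank_none (low : List Char) (c : String) (cats : List String) :
    List.foldl
      (fun acc x =>
        match acc with
        | none => some x
        | some m => if pvRank low x < pvRank low m then some x else some m)
      none (c :: cats) =
    (if pvRank low c = 0 then some c
     else match cats.find? (fun c' => pvRank low c' == 0) with
     | some c' => some c'
     | none =>
       if pvRank low c = 1 then some c
       else match cats.find? (fun c' => pvRank low c' == 1) with
         | some c' => some c'
         | none => some c) := by
  rw [List.foldl_cons]
  exact pvFold_min_rank low cats c

-- ===== VERDICT =====
theorem normalize_mistake_key_spec : Claim_equal_normalize_mistake_key := by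
  intro raw _
  unfold Spec_normalize_mistake_key normalize_mistake_key normalize_mistake_key_alt
  by_cases h : raw == ""
  · simp [h]
  · simp only [h, Bool.false_eq_true, if_false]
    set cleaned := PySem.Chars.strip ((PySem.Chars.strip raw.toList).dropWhile (fun c => c == '-')) with hcl
    set low := PySem.Chars.lower cleaned with hlow
    have hmin : PySem.List.min? pvCategories (pvRank low) =
        List.foldl
          (fun acc x =>
            match acc with
            | none => some x
            | some m => if pvRank low x < pvRank low m then some x else some m)
          none pvCategories := by
      unfold PySem.List.min?
      congr 1
      funext acc x
      cases acc <;> rfl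
    rw [pvPass1_eq_find pvCategories cleaned, ← hlow, hmin,
        show pvCategories = "Concept Confusion" ::
          ["Logic Error", "Order Confusion", "Syntax/Base Missing", "General Error"] from rfl,
        pvFold_min_rank_none low "Concept Confusion"
          ["Logic Error", "Order Confusion", "Syntax/Base Missing", "General Error"]]
    by_cases hh0 : pvRank low "Concept Confusion" = 0
    · rw [List.find?_cons_of_pos (p := fun c => pvRank low c == 0) (by simpa using hh0),
          if_pos hh0]
      simp [hh0]
    · rw [List.find?_cons_of_neg (p := fun c => pvRank low c == 0) (by simpa using hh0),
          if_neg hh0]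
      cases hf0 : List.find? (fun c => pvRank low c == 0)
          ["Logic Error", "Order Confusion", "Syntax/Base Missing", "General Error"] with
      | some c0 =>
        have hr0 : pvRank low c0 = 0 := by simpa using List.find?_some hf0
        simp [hr0]
      | none =>
        have hfull0 : List.find? (fun c => pvRank (PySem.Chars.lower cleaned) c == 0)
            ["Concept Confusion", "Logic Error", "Order Confusion", "Syntax/Base Missing", "General Error"] = none := by
          rw [← hlow,
              List.find?_cons_of_neg (p := fun c => pvRank low c == 0) (by simpa using hh0), hf0]
        rw [show ("Concept Confusion" :: ["Logic Error", "Order Confusion", "Syntax/Base Missing", "General Error"] : List String) = pvCategories from rfl] at hfull0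
        rw [show pvPass2 ["Concept Confusion", "Logic Error", "Order Confusion", "Syntax/Base Missing", "General Error"] cleaned = pvPass2 pvCategories cleaned from rfl,
            pvPass2_eq_find pvCategories cleaned hfull0, ← hlow,
            show pvCategories = ("Concept Confusion" :: ["Logic Error", "Order Confusion", "Syntax/Base Missing", "General Error"] : List String) from rfl]
        by_cases hh1 : pvRank low "Concept Confusion" = 1
        · rw [List.find?_cons_of_pos (p := fun c => pvRank low c == 1) (by simpa using hh1),
              if_pos hh1]
          simp [hh1]
        · rw [List.find?_cons_of_neg (p := fun c => pvRank low c == 1) (by simpa using hh1),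
              if_neg hh1]
          cases hf1 : List.find? (fun c => pvRank low c == 1)
              ["Logic Error", "Order Confusion", "Syntax/Base Missing", "General Error"] with
          | some c1 =>
            have hr1 : pvRank low c1 = 1 := by simpa using List.find?_some hf1
            simp [hr1]
          | none =>
            have h2 : pvRank low "Concept Confusion" = 2 := by
              have := pvRank_le_two low "Concept Confusion"; omega
            simp [h2, pvFallback]
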